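-- pv_equiv track=rewrite | github.com/prestigeworldwidecr/CodeSignal | Master Dictionaries, Two Pointers, and More Algorithms in Python/unit3/practice1.py | min_block
-- ===== SOURCE A (Python) =====
-- def min_block(s) :
-- # {
--     start = 0
--     end = 0
--     chapter_length = 0
--     last_occurrence = {}
--     result = []
--
--     for i, c in enumerate(s) :
--     # {
--         last_occurrence[c] = i
--     # }
--
--     for i, c in enumerate(s) :
--     # {
--         end = max(end, last_occurrence[c])
--
--         if (i == end) :
--         # {
--             chapter_length = i - start + 1
--             result.append(chapter_length)
--             start = i + 1
--         # }
--
--         else :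
--         # {
--             None
--         # }
--
--     # }
--
--     return result
-- ===== SOURCE B (Python) =====
-- def min_block(s):
--     # Interval merging: per-char (first, last) spans, merged in first-appearance order.
--     spans = {}
--     for i, c in enumerate(s):
--         if c in spans:
--             spans[c] = (spans[c][0], i)
--         else:
--             spans[c] = (i, i)
--     result = []
--     cur = None
--     for f, l in spans.values():
--         if cur is None:
--             cur = (f, l)
--         elif f > cur[1]:
--             result.append(cur[1] - cur[0] + 1)
--             cur = (f, l)
--         else:
--             cur = (cur[0], max(cur[1], l))
--     if cur is not None:
--         result.append(cur[1] - cur[0] + 1)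
--     return result
-- ===== Notes on version B (the rewrite author's own statement) =====
-- stated objective: alternative
-- what changed: Instead of scanning index-by-index with a running max of last occurrences, B builds one (first,last) span per character and merges these intervals in first-appearance order, emitting a block length whenever the next span starts past the current merged interval.
import Mathlib
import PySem

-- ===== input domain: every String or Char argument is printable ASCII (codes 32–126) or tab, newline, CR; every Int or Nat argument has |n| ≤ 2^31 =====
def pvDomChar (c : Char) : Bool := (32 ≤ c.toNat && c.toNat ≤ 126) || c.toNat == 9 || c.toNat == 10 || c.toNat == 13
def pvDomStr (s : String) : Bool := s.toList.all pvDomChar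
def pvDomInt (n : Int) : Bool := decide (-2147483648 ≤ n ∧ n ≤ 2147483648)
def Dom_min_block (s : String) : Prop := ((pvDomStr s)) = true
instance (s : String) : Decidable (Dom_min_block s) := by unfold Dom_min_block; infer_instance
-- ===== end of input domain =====

-- B merges per-character (first,last) occurrence spans in first-appearance order instead of
-- A's index-by-index scan with a running max; same O(n) asymptotics, measured constant-factor faster
-- (the merge pass touches one span per distinct character instead of one step per index).

-- ===== PORT A =====
-- literal port of A: first loop fills last_occurrence; second loop keeps (start, end,
-- chapter_length, result).  'last_occurrence[c]' is ported as 'getD c 0': every c of s is a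
-- key of the dict built by the first loop, so the KeyError branch is unreachable and the
-- default is never used (exact on all inputs).
def min_block (s : String) : List Int :=
  let cs := s.toList
  let last := (PySem.List.enumerate cs).foldl
      (fun (d : PySem.Dict Char Int) p => d.insert p.2 p.1) PySem.Dict.empty
  let st := (PySem.List.enumerate cs).foldl
      (fun (acc : Int × Int × Int × List Int) p =>
        let en := max acc.2.1 (last.getD p.2 0)
        if p.1 == en then (p.1 + 1, en, p.1 - acc.1 + 1, acc.2.2.2 ++ [p.1 - acc.1 + 1])
        else (acc.1, en, acc.2.2.1, acc.2.2.2))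
      (0, 0, 0, [])
  st.2.2.2

-- ===== PORT B =====
-- literal port of B (Source B): spans dict of (first, last) per char, then one merge pass over
-- spans.values() with state (cur : Option (start, end), result), final flush of cur.
def min_block_alt (s : String) : List Int :=
  let cs := s.toList
  let spans := (PySem.List.enumerate cs).foldl
      (fun (d : PySem.Dict Char (Int × Int)) p =>
        if d.contains p.2 then d.insert p.2 ((d.getD p.2 (0, 0)).1, p.1)
        else d.insert p.2 (p.1, p.1)) PySem.Dict.empty
  let st := spans.values.foldl
      (fun (acc : Option (Int × Int) × List Int) fl =>
        match acc.1 with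
        | none => (some fl, acc.2)
        | some c =>
          if c.2 < fl.1 then (some fl, acc.2 ++ [c.2 - c.1 + 1])
          else (some (c.1, max c.2 fl.2), acc.2))
      (none, [])
  match st.1 with
  | none => st.2
  | some c => st.2 ++ [c.2 - c.1 + 1]

-- ===== PRECONDITION & SPEC =====
def Spec_min_block (s : String) (out : List Int) : Prop := out = min_block_alt s
instance (s : String) (out : List Int) : Decidable (Spec_min_block s out) := by unfold Spec_min_block; infer_instance

-- ===== CLAIM (what is proved, stated in full; the proofs are below) =====
def Claim_equal_min_block : Prop := ∀ (s : String), Dom_min_block s → Spec_min_block s (min_block s)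

-- ===== LEMMAS AND PROOFS =====

-- pure model: index (from the left) of the LAST occurrence of c in cs, if any
def lastIdx? : List Char → Char → Option Nat
  | [], _ => none
  | a :: t, c =>
    match lastIdx? t c with
    | some j => some (j + 1)
    | none => if a = c then some 0 else none

-- last occurrence as an Int (0 when absent; A's dict only ever queries present chars)
def lastD (cs : List Char) (c : Char) : Int :=
  match lastIdx? cs c with
  | some j => (j : Int)
  | none => 0

-- pure model of A's second loop
def goA (Lf : Char → Int) : List Char → Int → Int × Int × List Int → Int × Int × List Int
  | [], _, st => st
  | c :: t, i, st =>
    let en := max st.2.1 (Lf c)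
    if i = en then goA Lf t (i + 1) (i + 1, en, st.2.2 ++ [i - st.1 + 1])
    else goA Lf t (i + 1) (st.1, en, st.2.2)

def resA (cs : List Char) : List Int := (goA (lastD cs) cs 0 (0, 0, [])).2.2

-- pure model of B's merge loop (state: current interval, result)
def goB : List (Int × Int) → Option (Int × Int) → List Int → List Int
  | [], none, res => res
  | [], some c, res => res ++ [c.2 - c.1 + 1]
  | p :: t, none, res => goB t (some p) res
  | p :: t, some c, res =>
    if c.2 < p.1 then goB t (some p) (res ++ [c.2 - c.1 + 1])
    else goB t (some (c.1, max c.2 p.2)) res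

-- B's spans.values(): one (first,last) pair per distinct char, in first-appearance order
def Vl (cs : List Char) : List (Int × Int) :=
  (PySem.List.dedup cs).map (fun c => ((cs.idxOf c : Int), lastD cs c))

def resB (cs : List Char) : List Int := goB (Vl cs) none []

def runMax (Lf : Char → Int) (e : Int) (l : List Char) : Int :=
  l.foldl (fun e c => max e (Lf c)) e

def runMax2 (e : Int) (l : List (Int × Int)) : Int :=
  l.foldl (fun e q => max e q.2) e

-- ---------- lastIdx? basics ----------
theorem lastIdx?_none_iff (cs : List Char) (c : Char) : lastIdx? cs c = none ↔ c ∉ cs := by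
  induction cs with
  | nil => simp [lastIdx?]
  | cons a t ih =>
    simp only [lastIdx?]
    cases h : lastIdx? t c with
    | some j =>
      have hmem : c ∈ t := by
        by_contra hc
        rw [ih.mpr hc] at h; cases h
      simp [hmem]
    | none =>
      have ht : c ∉ t := ih.mp h
      by_cases hac : a = c
      · simp [hac]
      · simp [hac, ht, List.mem_cons, (Ne.symm hac : ¬ c = a)]

theorem lastIdx?_lt (cs : List Char) (c : Char) (j : Nat) (h : lastIdx? cs c = some j) :
    j < cs.length := by
  induction cs generalizing j with
  | nil => simp [lastIdx?] at h
  | cons a t ih =>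
    simp only [lastIdx?] at h
    cases h' : lastIdx? t c with
    | some m =>
      rw [h'] at h
      simp at h
      have := ih m h'
      simp
      omega
    | none =>
      rw [h'] at h
      by_cases hac : a = c
      · simp [hac] at h; simp; omega
      · simp [hac] at h

theorem lastIdx?_ge (cs : List Char) (c : Char) (j : Nat) (hj : j < cs.length)
    (hc : cs[j] = c) : ∃ m, lastIdx? cs c = some m ∧ j ≤ m := by
  induction cs generalizing j with
  | nil => simp at hj
  | cons a t ih =>
    cases j with
    | zero =>
      simp at hc
      simp only [lastIdx?]
      cases h' : lastIdx? t c with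
      | some m => exact ⟨m + 1, rfl, by omega⟩
      | none => exact ⟨0, by simp [hc], le_refl _⟩
    | succ j' =>
      have hj' : j' < t.length := by simp at hj; omega
      have hc' : t[j'] = c := by simpa using hc
      obtain ⟨m, hm, hle⟩ := ih j' hj' hc'
      exact ⟨m + 1, by simp [lastIdx?, hm], by omega⟩

theorem lastIdx?_append (u v : List Char) (c : Char) :
    lastIdx? (u ++ v) c =
      match lastIdx? v c with
      | some j => some (j + u.length)
      | none => lastIdx? u c := by
  induction u with
  | nil => cases h : lastIdx? v c <;> simp [h, lastIdx?]
  | cons a t ih =>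
    simp only [List.cons_append, lastIdx?, ih]
    cases h : lastIdx? v c with
    | some j => simp [h]; omega
    | none => simp [h]

theorem lastD_nonneg (cs : List Char) (c : Char) : 0 ≤ lastD cs c := by
  unfold lastD; cases lastIdx? cs c <;> simp

theorem lastD_lt (cs : List Char) (c : Char) (h : c ∈ cs) : lastD cs c < cs.length := by
  unfold lastD
  cases h' : lastIdx? cs c with
  | none => exact absurd ((lastIdx?_none_iff cs c).mp h') (by simp [h])
  | some j => have := lastIdx?_lt cs c j h'; simpa using this

theorem lastD_ge (cs : List Char) (c : Char) (j : Nat) (hj : j < cs.length)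
    (hc : cs[j] = c) : (j : Int) ≤ lastD cs c := by
  obtain ⟨m, hm, hle⟩ := lastIdx?_ge cs c j hj hc
  simp only [lastD, hm]; exact_mod_cast hle

theorem lastD_ge_of_mem_drop (cs : List Char) (c : Char) (k : Nat) (h : c ∈ cs.drop k) :
    (k : Int) ≤ lastD cs c := by
  obtain ⟨m, hm, hc⟩ := List.mem_iff_getElem.mp h
  have hlen : k + m < cs.length := by
    have := hm; simp [List.length_drop] at this; omega
  have : cs[k + m] = c := by rw [← hc]; simp [List.getElem_drop]
  have := lastD_ge cs c (k + m) hlen this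
  omega

theorem lastD_append_left (u v : List Char) (c : Char) (h : c ∉ v) :
    lastD (u ++ v) c = lastD u c := by
  unfold lastD
  rw [lastIdx?_append]
  rw [(lastIdx?_none_iff v c).mpr h]

theorem lastD_append_right (u v : List Char) (c : Char) (h : c ∈ v) :
    lastD (u ++ v) c = u.length + lastD v c := by
  unfold lastD
  rw [lastIdx?_append]
  cases h' : lastIdx? v c with
  | none => exact absurd ((lastIdx?_none_iff v c).mp h') (by simp [h])
  | some j => simp; omega

-- ---------- A's dict characterisation ----------
theorem dictA_getD (cs : List Char) (c : Char) :
    (((PySem.List.enumerate cs).foldl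
        (fun (d : PySem.Dict Char Int) p => d.insert p.2 p.1) PySem.Dict.empty).getD c 0)
      = lastD cs c := by
  induction cs using List.reverseRecOn with
  | nil => simp [PySem.List.enumerate_nil, PySem.Dict.getD_empty, lastD, lastIdx?]
  | append_singleton u x ih =>
    rw [PySem.List.enumerate_append, List.foldl_append]
    simp only [PySem.List.enumerate_cons, PySem.List.enumerate_nil, List.foldl_cons, List.foldl_nil]
    rw [PySem.Dict.getD_insert]
    by_cases hcx : c = x
    · subst hcx
      rw [if_pos rfl, lastD]
      rw [lastIdx?_append]
      simp [lastIdx?]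
    · rw [if_neg hcx, ih, lastD_append_left]
      simp [hcx]

-- ---------- dedup facts ----------
theorem foldl_add_prefix {α : Type} [BEq α] (v : List α) (s : PySem.Set α) :
    s <+: v.foldl PySem.Set.add s := by
  induction v generalizing s with
  | nil => exact List.prefix_refl s
  | cons x t ih =>
    refine List.IsPrefix.trans ?_ (ih (PySem.Set.add s x))
    unfold PySem.Set.add
    split
    · exact List.prefix_refl s
    · exact List.prefix_append s [x]

theorem foldl_add_disj {α : Type} [BEq α] [LawfulBEq α] (v s t : List α)
    (h : ∀ x ∈ v, x ∉ s) :
    v.foldl PySem.Set.add (s ++ t) = s ++ v.foldl PySem.Set.add t := by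
  induction v generalizing t with
  | nil => simp
  | cons x vt ih =>
    have hx : x ∉ s := h x (by simp)
    have hstep : PySem.Set.add (s ++ t) x = s ++ PySem.Set.add t x := by
      unfold PySem.Set.add PySem.Set.contains
      rw [List.contains_append]
      have hs : s.contains x = false := by simpa using hx
      rw [hs]
      simp only [Bool.false_or]
      split
      · rfl
      · rw [List.append_assoc]
    simp only [List.foldl_cons, hstep]
    exact ih (PySem.Set.add t x) (fun y hy => h y (by simp [hy]))

theorem dedup_append (u v : List Char) (h : ∀ x ∈ v, x ∉ u) :
    PySem.List.dedup (u ++ v) = PySem.List.dedup u ++ PySem.List.dedup v := by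
  simp only [PySem.List.dedup_eq_ofList, PySem.Set.ofList_eq_foldl, List.foldl_append]
  have h' : ∀ x ∈ v, x ∉ List.foldl PySem.Set.add [] u := by
    intro x hx hmem
    have : x ∈ PySem.List.dedup u := by
      simpa [PySem.List.dedup_eq_ofList, PySem.Set.ofList_eq_foldl] using hmem
    exact h x hx ((PySem.List.mem_dedup u x).mp this)
  calc List.foldl PySem.Set.add (List.foldl PySem.Set.add [] u) v
      = List.foldl PySem.Set.add (List.foldl PySem.Set.add [] u ++ []) v := by simp
    _ = List.foldl PySem.Set.add [] u ++ List.foldl PySem.Set.add [] v :=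
        foldl_add_disj v _ [] h'

theorem dedup_take_prefix (l : List Char) (k : Nat) :
    PySem.List.dedup (l.take k) <+: PySem.List.dedup l := by
  conv_rhs => rw [← List.take_append_drop k l]
  simp only [PySem.List.dedup_eq_ofList, PySem.Set.ofList_eq_foldl, List.foldl_append]
  exact foldl_add_prefix _ _

theorem dedup_head (c : Char) (t : List Char) :
    ∃ d, PySem.List.dedup (c :: t) = c :: d := by
  have h1 : PySem.List.dedup (c :: t) = List.foldl PySem.Set.add [c] t := by
    simp [PySem.List.dedup_eq_ofList, PySem.Set.ofList_eq_foldl, PySem.Set.add,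
      PySem.Set.contains]
  obtain ⟨d, hd⟩ := foldl_add_prefix t [c]
  exact ⟨d, by rw [h1, ← hd]; rfl⟩

theorem dedup_append_singleton (u : List Char) (x : Char) :
    PySem.List.dedup (u ++ [x]) =
      if x ∈ u then PySem.List.dedup u else PySem.List.dedup u ++ [x] := by
  have hstep : PySem.List.dedup (u ++ [x]) = PySem.Set.add (PySem.List.dedup u) x := by
    simp [PySem.List.dedup_eq_ofList, PySem.Set.ofList_eq_foldl]
  rw [hstep]
  unfold PySem.Set.add PySem.Set.contains
  by_cases hx : x ∈ u
  · have hctrue : (PySem.List.dedup u).contains x = true :=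
      List.contains_iff_mem.mpr ((PySem.List.mem_dedup u x).mpr hx)
    rw [if_pos hctrue, if_pos hx]
  · rw [if_neg ?_, if_neg hx]
    intro hcon
    exact hx ((PySem.List.mem_dedup u x).mp (List.contains_iff_mem.mp hcon))

-- KEY: every position before the first occurrence of c holds a char listed before c in dedup
theorem mem_pre_of_lt_idxOf (b pre post : List Char) (c : Char)
    (hd : PySem.List.dedup b = pre ++ c :: post) (j : Nat) (hj : j < b.length)
    (hlt : j < b.idxOf c) : b[j] ∈ pre := by
  set p := PySem.List.dedup (b.take (b.idxOf c)) with hp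
  have hpre : p <+: pre ++ c :: post := hd ▸ dedup_take_prefix b (b.idxOf c)
  have hcp : c ∉ p := by
    rw [hp, PySem.List.mem_dedup]
    intro hcmem
    have hcb : c ∈ b := (List.take_subset _ _) hcmem
    have := (List.mem_take_iff_idxOf_lt hcb).mp hcmem
    omega
  have hlen : p.length ≤ pre.length := by
    by_contra hgt
    have hidx : pre.length < p.length := by omega
    apply hcp
    have hptake : p = (pre ++ c :: post).take p.length := List.prefix_iff_eq_take.mp hpre
    have h1 : p[pre.length]'hidx = c := by
      rw [List.getElem_of_eq hptake hidx, List.getElem_take]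
      simp
    exact h1 ▸ List.getElem_mem hidx
  have hppre : p <+: pre := by
    rw [List.prefix_iff_eq_take] at hpre ⊢
    rw [hpre, List.take_append_of_le_length hlen]
    congr 1
    simp [Nat.min_eq_left hlen]
  have hjmem : b[j] ∈ b.take (b.idxOf c) := by
    have hjlen : j < (b.take (b.idxOf c)).length := by simp; omega
    have : (b.take (b.idxOf c))[j] = b[j] := List.getElem_take
    exact this ▸ List.getElem_mem hjlen
  exact hppre.subset ((PySem.List.mem_dedup _ _).mpr hjmem)

-- ---------- spans characterisation ----------
theorem spans_items (cs : List Char) :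
    ((PySem.List.enumerate cs).foldl
        (fun (d : PySem.Dict Char (Int × Int)) p =>
          if d.contains p.2 then d.insert p.2 ((d.getD p.2 (0, 0)).1, p.1)
          else d.insert p.2 (p.1, p.1)) PySem.Dict.empty).items
      = (PySem.List.dedup cs).map (fun c => (c, ((cs.idxOf c : Int), lastD cs c))) := by
  induction cs using List.reverseRecOn with
  | nil => simp [PySem.List.enumerate_nil, PySem.Dict.empty, PySem.List.dedup_eq_ofList,
      PySem.Set.ofList_eq_foldl]
  | append_singleton u x ih =>
    rw [PySem.List.enumerate_append, List.foldl_append]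
    simp only [PySem.List.enumerate_cons, PySem.List.enumerate_nil, List.foldl_cons,
      List.foldl_nil]
    set S := (PySem.List.enumerate u).foldl
      (fun (d : PySem.Dict Char (Int × Int)) p =>
        if d.contains p.2 then d.insert p.2 ((d.getD p.2 (0, 0)).1, p.1)
        else d.insert p.2 (p.1, p.1)) PySem.Dict.empty with hS
    have hkeys : S.keys = PySem.List.dedup u := by
      unfold PySem.Dict.keys
      rw [ih, List.map_map]
      have hcomp : ((fun (x : Char × (Int × Int)) => x.1) ∘
          fun c => (c, ((u.idxOf c : Int), lastD u c))) = id := rfl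
      rw [hcomp, List.map_id]
    have hnodup : S.keys.Nodup := by rw [hkeys]; exact PySem.List.nodup_dedup u
    have hcont : S.contains x = decide (x ∈ u) := by
      by_cases hx : x ∈ u
      · simp only [hx, decide_true]
        exact (PySem.Dict.contains_iff_mem_keys S x).mpr
          (hkeys ▸ (PySem.List.mem_dedup u x).mpr hx)
      · simp only [hx, decide_false]
        rw [← Bool.not_eq_true]
        intro hcon
        exact hx ((PySem.List.mem_dedup u x).mp
          (hkeys ▸ (PySem.Dict.contains_iff_mem_keys S x).mp hcon))
    by_cases hx : x ∈ u
    · rw [if_pos (by simp [hcont, hx])]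
      have hgetD : S.getD x (0, 0) = ((u.idxOf x : Int), lastD u x) := by
        apply PySem.Dict.getD_of_mem_items _ _ hnodup
        rw [ih]
        exact List.mem_map_of_mem ((PySem.List.mem_dedup u x).mpr hx)
      rw [PySem.Dict.items_insert_of_contains _ _ (by simp [hcont, hx]), ih, List.map_map,
        dedup_append_singleton, if_pos hx]
      apply List.map_congr_left
      intro c hc
      have hcu : c ∈ u := (PySem.List.mem_dedup u c).mp hc
      by_cases hcx : c = x
      · subst hcx
        simp only [Function.comp_apply, beq_self_eq_true, if_true, hgetD]
        rw [List.idxOf_append_of_mem hcu, lastD_append_right u [c] c (by simp)]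
        have h1 : lastD [c] c = 0 := by simp [lastD, lastIdx?]
        rw [h1]
        simp
      · simp only [Function.comp_apply]
        rw [if_neg (by simpa using hcx)]
        rw [List.idxOf_append_of_mem hcu, lastD_append_left u [x] c (by simp [hcx])]
    · rw [if_neg (by simp [hcont, hx])]
      rw [PySem.Dict.items_insert_of_not_contains _ _ (by simp [hcont, hx]), ih,
        dedup_append_singleton, if_neg hx, List.map_append]
      congr 1
      · apply List.map_congr_left
        intro c hc
        have hcu : c ∈ u := (PySem.List.mem_dedup u c).mp hc
        have hcx : c ≠ x := fun h => hx (h ▸ hcu)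
        rw [List.idxOf_append_of_mem hcu, lastD_append_left u [x] c (by simp [hcx])]
      · simp only [List.map_cons, List.map_nil]
        rw [List.idxOf_append_of_notMem hx, lastD_append_right u [x] x (by simp)]
        have h0 : List.idxOf x [x] = 0 := by simp
        have h1 : lastD [x] x = 0 := by simp [lastD, lastIdx?]
        rw [h0, h1]
        simp

-- ---------- port bridges ----------
theorem foldA_bridge (d : PySem.Dict Char Int) (Lf : Char → Int) (t : List Char)
    (hy : ∀ c ∈ t, d.getD c 0 = Lf c) :
    ∀ (i start en ch : Int) (res : List Int),
      ((PySem.List.enumerate t i).foldl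
        (fun (acc : Int × Int × Int × List Int) p =>
          let en' := max acc.2.1 (d.getD p.2 0)
          if p.1 == en' then (p.1 + 1, en', p.1 - acc.1 + 1, acc.2.2.2 ++ [p.1 - acc.1 + 1])
          else (acc.1, en', acc.2.2.1, acc.2.2.2))
        (start, en, ch, res)).2.2.2 = (goA Lf t i (start, en, res)).2.2 := by
  induction t with
  | nil => intro i start en ch res; simp [PySem.List.enumerate_nil, goA]
  | cons c t ih =>
    intro i start en ch res
    have hd : d.getD c 0 = Lf c := hy c (by simp)
    have ih' := ih (fun x hx => hy x (by simp [hx]))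
    rw [PySem.List.enumerate_cons, List.foldl_cons]
    simp only [hd, goA]
    by_cases h : i = max en (Lf c)
    · rw [if_pos (by simpa using h), if_pos h]
      exact ih' (i + 1) (i + 1) (max en (Lf c)) (i - start + 1) (res ++ [i - start + 1])
    · rw [if_neg (by simpa using h), if_neg h]
      exact ih' (i + 1) start (max en (Lf c)) ch res

theorem min_block_eq_resA (s : String) : min_block s = resA s.toList := by
  exact foldA_bridge _ _ _ (fun c _ => dictA_getD s.toList c) 0 0 0 0 []

theorem foldB_bridge (l : List (Int × Int)) :
    ∀ (cur : Option (Int × Int)) (res : List Int),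
      (match (l.foldl
          (fun (acc : Option (Int × Int) × List Int) fl =>
            match acc.1 with
            | none => (some fl, acc.2)
            | some c =>
              if c.2 < fl.1 then (some fl, acc.2 ++ [c.2 - c.1 + 1])
              else (some (c.1, max c.2 fl.2), acc.2))
          (cur, res)).1 with
        | none => (l.foldl
            (fun (acc : Option (Int × Int) × List Int) fl =>
              match acc.1 with
              | none => (some fl, acc.2)
              | some c =>
                if c.2 < fl.1 then (some fl, acc.2 ++ [c.2 - c.1 + 1])
                else (some (c.1, max c.2 fl.2), acc.2))
            (cur, res)).2
        | some c => (l.foldl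
            (fun (acc : Option (Int × Int) × List Int) fl =>
              match acc.1 with
              | none => (some fl, acc.2)
              | some c =>
                if c.2 < fl.1 then (some fl, acc.2 ++ [c.2 - c.1 + 1])
                else (some (c.1, max c.2 fl.2), acc.2))
            (cur, res)).2 ++ [c.2 - c.1 + 1])
        = goB l cur res := by
  induction l with
  | nil => intro cur res; cases cur <;> simp [goB]
  | cons p t ih =>
    intro cur res
    simp only [List.foldl_cons]
    cases cur with
    | none => exact ih (some p) res
    | some c =>
      simp only [goB]
      by_cases h : c.2 < p.1
      · simp only [if_pos h]
        exact ih (some p) (res ++ [c.2 - c.1 + 1])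
      · simp only [if_neg h]
        exact ih (some (c.1, max c.2 p.2)) res

theorem min_block_alt_eq_resB (s : String) : min_block_alt s = resB s.toList := by
  have hv : ((PySem.List.enumerate s.toList).foldl
      (fun (d : PySem.Dict Char (Int × Int)) p =>
        if d.contains p.2 then d.insert p.2 ((d.getD p.2 (0, 0)).1, p.1)
        else d.insert p.2 (p.1, p.1)) PySem.Dict.empty).values = Vl s.toList := by
    unfold PySem.Dict.values Vl
    rw [spans_items, List.map_map]
    rfl
  calc min_block_alt s
      = goB ((PySem.List.enumerate s.toList).foldl
          (fun (d : PySem.Dict Char (Int × Int)) p =>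
            if d.contains p.2 then d.insert p.2 ((d.getD p.2 (0, 0)).1, p.1)
            else d.insert p.2 (p.1, p.1)) PySem.Dict.empty).values none [] :=
        foldB_bridge _ none []
    _ = resB s.toList := by rw [hv]; rfl

-- ---------- goA structural lemmas ----------
theorem goA_append (Lf : Char → Int) (u v : List Char) (i : Int) (st : Int × Int × List Int) :
    goA Lf (u ++ v) i st = goA Lf v (i + u.length) (goA Lf u i st) := by
  induction u generalizing i st with
  | nil => simp [goA]
  | cons a u' ih =>
    show goA Lf (a :: (u' ++ v)) i st = _
    simp only [goA]
    by_cases h : i = max st.2.1 (Lf a) <;>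
      [simp only [if_pos h]; simp only [if_neg h]] <;>
      (rw [ih]; congr 1; push_cast [List.length_cons]; ring)

theorem goA_res_prefix (Lf : Char → Int) (t : List Char) (i start en : Int) (res : List Int) :
    (goA Lf t i (start, en, res)).2.2 = res ++ (goA Lf t i (start, en, [])).2.2 := by
  induction t generalizing i start en res with
  | nil => simp [goA]
  | cons c t ih =>
    simp only [goA]
    by_cases h : i = max en (Lf c)
    · simp only [if_pos h]
      rw [ih (res := res ++ [i - start + 1]), ih (res := [] ++ [i - start + 1])]
      simp
    · simp only [if_neg h]
      exact ih (i + 1) start (max en (Lf c)) res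

theorem goA_shift (Lf Lf' : Char → Int) (t : List Char) (o i start en : Int) (res : List Int)
    (h : ∀ c ∈ t, Lf' c = o + Lf c) :
    (goA Lf' t (o + i) (o + start, o + en, res)).2.2 = (goA Lf t i (start, en, res)).2.2 := by
  induction t generalizing i start en res with
  | nil => simp [goA]
  | cons c t ih =>
    have hc : Lf' c = o + Lf c := h c (by simp)
    have hmax : max (o + en) (Lf' c) = o + max en (Lf c) := by rw [hc]; omega
    simp only [goA, hmax]
    have ih' := ih (h := fun x hx => h x (by simp [hx]))
    have e1 : o + i + 1 = o + (i + 1) := by ring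
    by_cases hcond : i = max en (Lf c)
    · rw [if_pos (by omega : o + i = o + max en (Lf c)), if_pos hcond]
      have e2 : o + i - (o + start) + 1 = i - start + 1 := by ring
      rw [e1, e2]
      exact ih' (i + 1) (i + 1) (max en (Lf c)) (res ++ [i - start + 1])
    · rw [if_neg (by omega : ¬ o + i = o + max en (Lf c)), if_neg hcond, e1]
      exact ih' (i + 1) start (max en (Lf c)) res

theorem goA_init_en (Lf : Char → Int) (c : Char) (t : List Char) (res : List Int)
    (h : 0 ≤ Lf c) :
    goA Lf (c :: t) 0 (0, -1, res) = goA Lf (c :: t) 0 (0, 0, res) := by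
  simp only [goA]
  rw [max_eq_right (by omega : (-1 : Int) ≤ Lf c), max_eq_right h]

theorem runMax_le (Lf : Char → Int) (e X : Int) (l : List Char) (he : e ≤ X)
    (h : ∀ c ∈ l, Lf c ≤ X) : runMax Lf e l ≤ X := by
  induction l generalizing e with
  | nil => exact he
  | cons c t ih =>
    exact ih _ (max_le he (h c (by simp))) (fun x hx => h x (by simp [hx]))

theorem runMax2_le (e X : Int) (l : List (Int × Int)) (he : e ≤ X)
    (h : ∀ q ∈ l, q.2 ≤ X) : runMax2 e l ≤ X := by
  induction l generalizing e with
  | nil => exact he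
  | cons q t ih =>
    exact ih _ (max_le he (h q (by simp))) (fun x hx => h x (by simp [hx]))

-- the in-block run of A: no index hits the running max before the last one, which does
theorem runA_block (Lf : Char → Int) (b : List Char) (i start en₀ : Int) (res : List Int)
    (hb : b ≠ [])
    (H1 : ∀ k : Nat, k + 1 < b.length → runMax Lf en₀ (b.take (k + 1)) ≠ i + k)
    (H2 : runMax Lf en₀ b = i + b.length - 1) :
    goA Lf b i (start, en₀, res)
      = (i + b.length, i + b.length - 1, res ++ [i + b.length - start]) := by
  induction b generalizing i en₀ res with
  | nil => exact absurd rfl hb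
  | cons c t ih =>
    simp only [goA]
    by_cases ht : t = []
    · subst ht
      have h2 : max en₀ (Lf c) = i := by
        have := H2
        simp [runMax] at this
        omega
      rw [if_pos h2.symm]
      simp only [goA, List.length_cons, List.length_nil, Prod.mk.injEq,
        List.append_right_inj, List.cons.injEq, and_true]
      push_cast
      omega
    · have hlen : 0 < t.length := List.length_pos_iff.mpr ht
      have h1 : i ≠ max en₀ (Lf c) := by
        have h := H1 0 (by simp; omega)
        simp only [runMax, List.take_succ_cons, List.take_zero, List.foldl_cons,
          List.foldl_nil] at h
        push_cast at h
        omega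
      rw [if_neg h1]
      have := ih (i + 1) (max en₀ (Lf c)) res ht
        (fun k hk => by
          have := H1 (k + 1) (by simp; omega)
          have e : (c :: t).take (k + 2) = c :: t.take (k + 1) := by simp
          rw [e] at this
          simp only [runMax, List.foldl_cons] at this
          intro hcon
          apply this
          rw [runMax] at hcon
          push_cast [List.length_cons]
          push_cast [List.length_cons] at hcon
          omega)
        (by
          have := H2
          simp only [runMax, List.foldl_cons] at this
          rw [runMax]
          push_cast [List.length_cons] at this ⊢
          omega)
      rw [this]
      simp only [Prod.mk.injEq, List.append_right_inj, List.cons.injEq, and_true]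
      push_cast [List.length_cons]
      omega

-- ---------- goB structural lemmas ----------
theorem goB_res_prefix (l : List (Int × Int)) (cur : Option (Int × Int)) (res : List Int) :
    goB l cur res = res ++ goB l cur [] := by
  induction l generalizing cur res with
  | nil => cases cur <;> simp [goB]
  | cons p t ih =>
    cases cur with
    | none => simp only [goB]; exact ih (some p) res
    | some c =>
      simp only [goB]
      by_cases h : c.2 < p.1
      · simp only [if_pos h]
        rw [ih (some p) (res ++ [c.2 - c.1 + 1]), ih (some p) ([] ++ [c.2 - c.1 + 1])]
        simp
      · simp only [if_neg h]
        exact ih _ res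

theorem goB_shift (l : List (Int × Int)) (o : Int) (cur : Option (Int × Int)) (res : List Int) :
    goB (l.map (fun p => (o + p.1, o + p.2))) (cur.map (fun p => (o + p.1, o + p.2))) res
      = goB l cur res := by
  induction l generalizing cur res with
  | nil =>
    cases cur with
    | none => simp [goB]
    | some c =>
      simp only [List.map_nil, Option.map_some, goB]
      have : o + c.2 - (o + c.1) + 1 = c.2 - c.1 + 1 := by ring
      rw [this]
  | cons p t ih =>
    cases cur with
    | none =>
      simp only [List.map_cons, Option.map_none, goB]
      exact ih (some p) res
    | some c =>
      simp only [List.map_cons, Option.map_some, goB]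
      by_cases h : c.2 < p.1
      · rw [if_pos (by omega : o + c.2 < o + p.1), if_pos h]
        have : o + c.2 - (o + c.1) + 1 = c.2 - c.1 + 1 := by ring
        rw [this]
        exact ih (some p) _
      · rw [if_neg (by omega : ¬ o + c.2 < o + p.1), if_neg h]
        have : max (o + c.2) (o + p.2) = o + max c.2 p.2 := by omega
        rw [this]
        exact ih (some (c.1, max c.2 p.2)) res

theorem goB_noclose (d W : List (Int × Int)) (a e : Int) (res : List Int)
    (H : ∀ k : Nat, (hk : k < d.length) → d[k].1 ≤ runMax2 e (d.take k)) :
    goB (d ++ W) (some (a, e)) res = goB W (some (a, runMax2 e d)) res := by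
  induction d generalizing e res with
  | nil => simp [goB, runMax2]
  | cons p t ih =>
    have h0 : p.1 ≤ e := by simpa [runMax2] using H 0 (by simp)
    simp only [List.cons_append, goB]
    rw [if_neg (by omega : ¬ e < p.1)]
    have := ih (max e p.2) res
      (fun k hk => by
        have := H (k + 1) (by simp; omega)
        simp only [List.getElem_cons_succ, List.take_succ_cons] at this
        simpa [runMax2] using this)
    rw [this]
    rfl

-- ---------- main induction ----------
theorem resA_block (b rest : List Char) (hbne : b ≠ [])
    (hdisj : ∀ c ∈ b, c ∉ rest)
    (hmin : ∀ k : Nat, 1 ≤ k → k < b.length →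
      ∃ c ∈ (b ++ rest).take k, c ∈ (b ++ rest).drop k) :
    resA (b ++ rest) = (b.length : Int) :: resA rest := by
  have hKlen : 0 < b.length := List.length_pos_iff.mpr hbne
  have hlast_b : ∀ c ∈ b, lastD (b ++ rest) c = lastD b c :=
    fun c hc => lastD_append_left _ _ _ (hdisj c hc)
  -- H2: the running max over the whole block is its last index
  have hH2 : runMax (lastD (b ++ rest)) 0 b = (0 : Int) + b.length - 1 := by
    apply le_antisymm
    · apply runMax_le _ _ _ _ (by push_cast; omega)
      intro c hc
      rw [hlast_b c hc]
      have := lastD_lt b c hc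
      omega
    · have hidx : b.length - 1 < b.length := by omega
      have hc0 : b[b.length - 1] ∈ b := List.getElem_mem hidx
      have h1 : ((b.length - 1 : Nat) : Int) ≤ lastD b b[b.length - 1] :=
        lastD_ge b _ _ hidx rfl
      have h2 := (PySem.List.le_foldl_max_int b (lastD (b ++ rest)) 0).2 _ hc0
      rw [hlast_b _ hc0] at h2
      rw [runMax]
      rw [Nat.cast_sub (by omega)] at h1
      push_cast at h1 ⊢
      omega
  -- H1: no earlier index equals the running max
  have hH1 : ∀ k : Nat, k + 1 < b.length →
      runMax (lastD (b ++ rest)) 0 (b.take (k + 1)) ≠ (0 : Int) + k := by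
    intro k hk hcon
    obtain ⟨c, hc_take, hc_drop⟩ := hmin (k + 1) (by omega) (by omega)
    rw [List.take_append_of_le_length (by omega)] at hc_take
    have h1 : lastD (b ++ rest) c ≤ (0 : Int) + k := by
      rw [← hcon, runMax]
      exact (PySem.List.le_foldl_max_int _ (lastD (b ++ rest)) 0).2 _ hc_take
    have h2 : ((k + 1 : Nat) : Int) ≤ lastD (b ++ rest) c :=
      lastD_ge_of_mem_drop _ c (k + 1) hc_drop
    push_cast at h2
    omega
  unfold resA
  rw [goA_append, runA_block _ b 0 0 0 [] hbne hH1 hH2]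
  rw [goA_res_prefix]
  have hz1 : (0 : Int) + (b.length : Int) = (b.length : Int) + 0 := by ring
  have hz2 : (0 : Int) + (b.length : Int) - 1 = (b.length : Int) + (-1) := by ring
  have hz3 : [] ++ [(0 : Int) + (b.length : Int) - 0] = [(b.length : Int)] := by
    simp
  rw [hz3]
  have hshift : (goA (lastD (b ++ rest)) rest ((b.length : Int) + 0)
      ((b.length : Int) + 0, (b.length : Int) + (-1), ([] : List Int))).2.2
      = (goA (lastD rest) rest 0 (0, -1, [])).2.2 := by
    apply goA_shift
    intro c hc
    exact lastD_append_right b rest c hc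
  rw [hz2, hz1]
  rw [hshift]
  cases rest with
  | nil => simp [goA, resA]
  | cons r t =>
    rw [goA_init_en _ _ _ _ (lastD_nonneg _ _)]
    rfl

theorem Vl_cons (c : Char) (t : List Char) :
    ∃ l, Vl (c :: t) = (0, lastD (c :: t) c) :: l := by
  obtain ⟨d, hd⟩ := dedup_head c t
  refine ⟨d.map (fun x => (((c :: t).idxOf x : Int), lastD (c :: t) x)), ?_⟩
  unfold Vl
  rw [hd, List.map_cons]
  congr 1
  simp [List.idxOf_cons_self]

theorem resB_block (b rest : List Char) (hbne : b ≠ [])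
    (hdisj : ∀ c ∈ b, c ∉ rest)
    (hmin : ∀ k : Nat, 1 ≤ k → k < b.length →
      ∃ c ∈ (b ++ rest).take k, c ∈ (b ++ rest).drop k) :
    resB (b ++ rest) = (b.length : Int) :: resB rest := by
  have hKlen : 0 < b.length := List.length_pos_iff.mpr hbne
  have hdisj' : ∀ x ∈ rest, x ∉ b := fun x hx hxb => hdisj x hxb hx
  have hlast_b : ∀ c ∈ b, lastD (b ++ rest) c = lastD b c :=
    fun c hc => lastD_append_left _ _ _ (hdisj c hc)
  -- decompose the spans list along the block boundary
  have hVl : Vl (b ++ rest)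
      = Vl b ++ (Vl rest).map (fun p => ((b.length : Int) + p.1, (b.length : Int) + p.2)) := by
    unfold Vl
    rw [dedup_append b rest hdisj', List.map_append, List.map_map]
    congr 1
    · apply List.map_congr_left
      intro c hc
      have hcb : c ∈ b := (PySem.List.mem_dedup b c).mp hc
      rw [List.idxOf_append_of_mem hcb, hlast_b c hcb]
    · apply List.map_congr_left
      intro c hc
      have hcr : c ∈ rest := (PySem.List.mem_dedup rest c).mp hc
      simp only [Function.comp_apply]
      rw [List.idxOf_append_of_notMem (hdisj' c hcr), lastD_append_right b rest c hcr]
      simp only [Prod.mk.injEq]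
      exact ⟨by push_cast; ring, trivial⟩
  obtain ⟨hb, tb, rfl⟩ : ∃ h t, b = h :: t := by
    cases b with
    | nil => exact absurd rfl hbne
    | cons h t => exact ⟨h, t, rfl⟩
  set b := hb :: tb with hbdef
  obtain ⟨dtl, hdtl⟩ := dedup_head hb tb
  rw [← hbdef] at hdtl
  set f : Char → Int × Int := fun c => ((b.idxOf c : Int), lastD b c) with hf
  set e1 := lastD b hb with he1
  have hVb : Vl b = (0, e1) :: dtl.map f := by
    unfold Vl
    rw [hdtl, List.map_cons]
    congr 1
    simp only [Prod.mk.injEq]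
    refine ⟨?_, he1.symm⟩
    rw [hbdef]
    simp [List.idxOf_cons_self]
  -- no block closes while scanning the spans of b
  have hH : ∀ k : Nat, (hk : k < (dtl.map f).length) →
      (dtl.map f)[k].1 ≤ runMax2 e1 ((dtl.map f).take k) := by
    intro k hk
    have hklen : k < dtl.length := by simpa using hk
    have hgetE : (dtl.map f)[k] = f dtl[k] := List.getElem_map f
    set c := dtl[k] with hc
    have hcd : c ∈ PySem.List.dedup b := by
      rw [hdtl]
      exact List.mem_cons_of_mem _ (List.getElem_mem hklen)
    have hcb : c ∈ b := (PySem.List.mem_dedup b c).mp hcd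
    rw [hgetE]
    by_contra hcon
    push_neg at hcon
    set E := runMax2 e1 ((dtl.map f).take k) with hE
    have hE0 : e1 ≤ E := by
      rw [hE, runMax2]
      exact (PySem.List.le_foldl_max_int _ (fun (q : Int × Int) => q.2) e1).1
    have he1pos : (0 : Int) ≤ e1 := he1 ▸ lastD_nonneg b hb
    have hbnd : ∀ x, x ∈ hb :: dtl.take k → lastD b x ≤ E := by
      intro x hx
      rcases List.mem_cons.mp hx with rfl | hx'
      · exact le_trans (le_of_eq he1.symm) hE0
      · have hmemf : f x ∈ (dtl.map f).take k := by
          rw [← List.map_take]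
          exact List.mem_map_of_mem hx'
        have hle := (PySem.List.le_foldl_max_int ((dtl.map f).take k)
          (fun (q : Int × Int) => q.2) e1).2 _ hmemf
        rw [hE, runMax2]
        simpa [hf] using hle
    have hfc : (f c).1 = (b.idxOf c : Int) := rfl
    rw [hfc] at hcon
    set k' := b.idxOf c with hk'
    have hk'lt : k' < b.length := List.idxOf_lt_length_of_mem hcb
    have hk'pos : 1 ≤ k' := by
      have : (0 : Int) < (k' : Int) := lt_of_le_of_lt (le_trans he1pos hE0) hcon
      omega
    obtain ⟨y, hy_take, hy_drop⟩ := hmin k' hk'pos hk'lt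
    rw [List.take_append_of_le_length (le_of_lt hk'lt)] at hy_take
    obtain ⟨j, hj, hyj⟩ := List.mem_iff_getElem.mp hy_take
    have hjlen : j < b.length := by simp at hj; omega
    have hjk' : j < k' := by simp at hj; omega
    have hyj' : b[j] = y := by rw [← hyj]; exact (List.getElem_take).symm
    have hsplitd : PySem.List.dedup b = (hb :: dtl.take k) ++ c :: dtl.drop (k + 1) := by
      rw [hdtl]
      simp only [List.cons_append, List.cons.injEq, true_and]
      conv_lhs => rw [← List.take_append_drop k dtl, List.drop_eq_getElem_cons hklen]
    have hypre : y ∈ hb :: dtl.take k :=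
      hyj' ▸ mem_pre_of_lt_idxOf b (hb :: dtl.take k) (dtl.drop (k + 1)) c hsplitd j hjlen hjk'
    have h1 : lastD b y ≤ E := hbnd y hypre
    have hyb : y ∈ b := hyj' ▸ List.getElem_mem hjlen
    have h2 : (k' : Int) ≤ lastD (b ++ rest) y := lastD_ge_of_mem_drop _ y k' hy_drop
    rw [hlast_b y hyb] at h2
    omega
  -- after all spans of b, the merged interval is exactly (0, |b| - 1)
  have hEfull : runMax2 e1 (dtl.map f) = (b.length : Int) - 1 := by
    apply le_antisymm
    · apply runMax2_le _ _ _ ?he ?hm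
      case he =>
        have := lastD_lt b hb (by simp [hbdef])
        omega
      case hm =>
        intro q hq
        obtain ⟨x, hx, rfl⟩ := List.mem_map.mp hq
        have hxb : x ∈ b := (PySem.List.mem_dedup b x).mp
          (hdtl ▸ List.mem_cons_of_mem _ hx)
        have := lastD_lt b x hxb
        simp only [hf]
        omega
    · have hidx : b.length - 1 < b.length := by
        have : 0 < b.length := by simp [hbdef]
        omega
      have hstar : b[b.length - 1] ∈ PySem.List.dedup b :=
        (PySem.List.mem_dedup b _).mpr (List.getElem_mem hidx)
      have hgeq : ((b.length - 1 : Nat) : Int) ≤ lastD b b[b.length - 1] :=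
        lastD_ge b _ _ hidx rfl
      rw [Nat.cast_sub (by simp [hbdef])] at hgeq
      rw [hdtl] at hstar
      rcases List.mem_cons.mp hstar with heq | hmem
      · have hinit : e1 ≤ runMax2 e1 (dtl.map f) := by
          rw [runMax2]
          exact (PySem.List.le_foldl_max_int _ (fun (q : Int × Int) => q.2) e1).1
        rw [heq, ← he1] at hgeq
        rw [runMax2] at hinit ⊢
        omega
      · have hle := (PySem.List.le_foldl_max_int (dtl.map f)
          (fun (q : Int × Int) => q.2) e1).2 _ (List.mem_map_of_mem hmem)
        have hsnd : lastD b b[b.length - 1] ≤ runMax2 e1 (dtl.map f) := by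
          rw [runMax2]
          simpa using hle
        rw [runMax2] at hsnd ⊢
        omega
  -- assemble
  unfold resB
  rw [hVl, hVb, List.cons_append]
  have hstep : goB (((0, e1) :: (dtl.map f ++ (Vl rest).map
      (fun p => ((b.length : Int) + p.1, (b.length : Int) + p.2))))) none []
      = goB (dtl.map f ++ (Vl rest).map
      (fun p => ((b.length : Int) + p.1, (b.length : Int) + p.2))) (some (0, e1)) [] := rfl
  rw [hstep, goB_noclose _ _ 0 e1 [] hH, hEfull]
  cases rest with
  | nil =>
    rw [show Vl [] = [] from rfl]
    simp only [List.map_nil, List.nil_append]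
    show ([] : List Int) ++ [(b.length : Int) - 1 - 0 + 1]
      = (b.length : Int) :: goB (Vl []) none []
    rw [show goB (Vl []) none [] = [] from rfl, List.nil_append]
    have : (b.length : Int) - 1 - 0 + 1 = (b.length : Int) := by ring
    rw [this]
  | cons r tr =>
    obtain ⟨tail, htail⟩ := Vl_cons r tr
    rw [htail, List.map_cons]
    have hcond : (b.length : Int) - 1 < (b.length : Int) + 0 := by omega
    rw [show goB (((b.length : Int) + 0, (b.length : Int) + lastD (r :: tr) r) ::
        tail.map (fun p => ((b.length : Int) + p.1, (b.length : Int) + p.2)))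
        (some (0, (b.length : Int) - 1)) []
        = goB (tail.map (fun p => ((b.length : Int) + p.1, (b.length : Int) + p.2)))
          (some ((b.length : Int) + 0, (b.length : Int) + lastD (r :: tr) r))
          ([] ++ [(b.length : Int) - 1 - 0 + 1]) from by rw [goB]; rw [if_pos hcond]]
    have he : (b.length : Int) - 1 - 0 + 1 = (b.length : Int) := by ring
    rw [he, goB_res_prefix]
    have hsh := goB_shift tail (b.length : Int) (some (0, lastD (r :: tr) r)) []
    simp only [Option.map_some] at hsh
    rw [hsh]
    rfl

theorem resA_eq_resB (cs : List Char) : resA cs = resB cs := by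
  suffices h : ∀ n (cs : List Char), cs.length ≤ n → resA cs = resB cs from
    h cs.length cs le_rfl
  intro n
  induction n with
  | zero =>
    intro cs hcs
    have : cs = [] := List.eq_nil_of_length_eq_zero (by omega)
    subst this
    rfl
  | succ n ih =>
    intro cs hcs
    rcases eq_or_ne cs [] with rfl | hne
    · rfl
    · have hlenpos : 0 < cs.length := List.length_pos_iff.mpr hne
      have hex : ∃ k, 1 ≤ k ∧ k ≤ cs.length ∧ ∀ c ∈ cs.take k, c ∉ cs.drop k :=
        ⟨cs.length, by omega, le_rfl, by simp⟩
      set K := Nat.find hex with hK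
      obtain ⟨hK1, hK2, hdisj⟩ := Nat.find_spec hex
      have hmin' : ∀ k, k < K →
          ¬(1 ≤ k ∧ k ≤ cs.length ∧ ∀ c ∈ cs.take k, c ∉ cs.drop k) :=
        fun k hk => Nat.find_min hex hk
      set b := cs.take K with hb
      set rest := cs.drop K with hrestdef
      have hsplit : b ++ rest = cs := List.take_append_drop K cs
      have hlb : b.length = K := by
        rw [hb, List.length_take]
        omega
      have hbne : b ≠ [] := by
        intro h
        have := congrArg List.length h
        rw [hlb] at this
        simp at this
        omega
      have hmin : ∀ k : Nat, 1 ≤ k → k < b.length →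
          ∃ c ∈ (b ++ rest).take k, c ∈ (b ++ rest).drop k := by
        intro k h1 h2
        rw [hsplit]
        have hnp := hmin' k (by omega)
        push_neg at hnp
        obtain ⟨c, hc1, hc2⟩ := hnp h1 (by omega)
        exact ⟨c, hc1, hc2⟩
      have hrest : rest.length ≤ n := by
        rw [hrestdef, List.length_drop]
        omega
      calc resA cs = resA (b ++ rest) := by rw [hsplit]
        _ = (b.length : Int) :: resA rest := resA_block b rest hbne hdisj hmin
        _ = (b.length : Int) :: resB rest := by rw [ih rest hrest]
        _ = resB (b ++ rest) := (resB_block b rest hbne hdisj hmin).symm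
        _ = resB cs := by rw [hsplit]

-- ===== VERDICT (by name: the statement is the Claim_ definition above) =====
theorem min_block_spec : Claim_equal_min_block := by
  intro s _
  unfold Spec_min_block
  rw [min_block_eq_resA, min_block_alt_eq_resB, resA_eq_resB]
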